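-- pv_equiv track=rewrite | github.com/BaojiZheng0110/9_10_Lab | Baoji_Lab4_solution.py | binary_research
-- ===== SOURCE A (Python) =====
-- def binary_research(matrix, k) :
--     def bin_row(row, k):
--         if len(row) == 0:
--             return None
--
--         m = len(row) // 2
--         if k == row[m]:
--             return m
--         elif row[m] < k:
--             idx = bin_row(row[m+1:], k)
--             if idx is None:
--                 return None
--             return m+1+idx
--         else: return bin_row(row[:m], k)
--
--
--     for row in matrix:
--         if len(row) == 0:
--             continue
--
--         if k < row[0] or k > row[-1]:
--             continue
--
--         if bin_row(row, k) is not None: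
--             return True
--
--     return False
-- ===== SOURCE B (Python) =====
-- def binary_research(matrix, k):
--     for row in matrix:
--         if not row or k < row[0] or k > row[-1]:
--             continue
--         lo, hi = 0, len(row)
--         while lo < hi:
--             m = (lo + hi) // 2
--             v = row[m]
--             if v == k:
--                 return True
--             if v < k:
--                 lo = m + 1
--             else:
--                 hi = m
--     return False
-- ===== Notes on version B (the rewrite author's own statement) =====
-- stated objective: alternative
-- what changed: Replaces the recursive slicing binary search returning an optional index with an iterative lo/hi index-based binary search returning a plain boolean (no slice copies, no recursion, no Option).
import Mathlib
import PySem

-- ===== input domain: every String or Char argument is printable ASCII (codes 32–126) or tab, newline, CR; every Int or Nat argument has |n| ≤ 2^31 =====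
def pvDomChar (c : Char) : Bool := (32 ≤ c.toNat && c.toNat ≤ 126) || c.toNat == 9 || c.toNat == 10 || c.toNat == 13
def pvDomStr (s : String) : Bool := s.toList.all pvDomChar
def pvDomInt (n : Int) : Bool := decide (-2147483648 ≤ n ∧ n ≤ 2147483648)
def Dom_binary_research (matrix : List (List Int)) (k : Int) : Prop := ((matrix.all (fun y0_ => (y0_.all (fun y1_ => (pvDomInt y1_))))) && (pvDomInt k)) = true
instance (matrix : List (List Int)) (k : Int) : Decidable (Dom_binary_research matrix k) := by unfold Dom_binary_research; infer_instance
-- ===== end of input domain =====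

-- B replaces A's recursive slicing binary search (optional index result) with an iterative
-- lo/hi index binary search returning a boolean; same result on every input (alternative).

-- ===== PORT A =====
-- inner helper bin_row: recursive binary search on slice copies, returns the index or None
def pvBinRowA (row : List Int) (k : Int) : Option Int :=
  if row.length = 0 then none
  else
    let m : Nat := row.length / 2   -- len(row) // 2 (len is nonneg, so Nat division is exact)
    -- row[m] with 0 ≤ m < len(row): pyGetD is exact here
    let v := PySem.List.pyGetD row (m : Int) 0
    if k = v then some (m : Int)
    else if v < k then
      match pvBinRowA (PySem.List.slice row (some (((m+1 : Nat) : Int))) none) k with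
      | none => none
      | some idx => some ((m : Int) + 1 + idx)
    else pvBinRowA (PySem.List.slice row none (some (m : Int))) k
termination_by row.length
decreasing_by
  · rw [PySem.List.slice_from_natCast]
    simp only [List.length_drop]; omega
  · rw [PySem.List.slice_to_natCast]
    simp only [List.length_take]; omega

def binary_research (matrix : List (List Int)) (k : Int) : Bool :=
  match matrix with
  | [] => false
  | row :: rest =>
    if row.length = 0 then binary_research rest k
    else if k < PySem.List.pyGetD row 0 0 ∨ PySem.List.pyGetD row (-1) 0 < k then
      binary_research rest k
    else if (pvBinRowA row k).isSome then true
    else binary_research rest k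

-- ===== PORT B =====
-- iterative while lo < hi loop, indices only, no copies
def pvBSearch (row : List Int) (k : Int) (lo hi : Nat) : Bool :=
  if h : lo < hi then
    let m : Nat := (lo + hi) / 2
    let v := PySem.List.pyGetD row (m : Int) 0
    if v = k then true
    else if v < k then pvBSearch row k (m + 1) hi
    else pvBSearch row k lo m
  else false
termination_by hi - lo
decreasing_by all_goals omega

def binary_research_alt (matrix : List (List Int)) (k : Int) : Bool :=
  match matrix with
  | [] => false
  | row :: rest =>
    if row.length = 0 ∨ k < PySem.List.pyGetD row 0 0 ∨ PySem.List.pyGetD row (-1) 0 < k then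
      binary_research_alt rest k
    else if pvBSearch row k 0 row.length then true
    else binary_research_alt rest k

-- ===== PRECONDITION & SPEC =====
def Spec_binary_research (matrix : List (List Int)) (k : Int) (out : Bool) : Prop := out = binary_research_alt matrix k
instance (matrix : List (List Int)) (k : Int) (out : Bool) : Decidable (Spec_binary_research matrix k out) := by unfold Spec_binary_research; infer_instance

-- ===== CLAIM (what is proved, stated in full; the proofs are below) =====
def Claim_equal_binary_research : Prop := ∀ (matrix : List (List Int)) (k : Int), Dom_binary_research matrix k → Spec_binary_research matrix k (binary_research matrix k)

-- ===== LEMMAS AND PROOFS =====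

-- the iterative search on row[lo:hi] computes exactly whether A's slicing search finds k there
theorem pvBSearch_eq_aux (row : List Int) (k : Int) :
    ∀ n lo hi, hi - lo = n → lo ≤ hi → hi ≤ row.length →
      pvBSearch row k lo hi = (pvBinRowA ((row.drop lo).take (hi - lo)) k).isSome := by
  intro n
  induction n using Nat.strong_induction_on with
  | _ n ih =>
    intro lo hi hn h1 h2
    have hlen : ((row.drop lo).take (hi - lo)).length = hi - lo := by
      simp [List.length_take, List.length_drop]; omega
    by_cases hlt : lo < hi
    · rw [pvBSearch, pvBinRowA, dif_pos hlt]
      have hne : ¬ ((row.drop lo).take (hi - lo)).length = 0 := by omega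
      rw [if_neg hne]
      simp only [hlen]
      have hmlt : (hi - lo) / 2 < hi - lo := by omega
      have hmid : (lo + hi) / 2 = lo + (hi - lo) / 2 := by omega
      rw [hmid]
      -- the probed element is the same
      have hv : PySem.List.pyGetD ((row.drop lo).take (hi - lo)) (((hi - lo) / 2 : Nat) : Int) 0
          = PySem.List.pyGetD row ((lo + (hi - lo) / 2 : Nat) : Int) 0 := by
        rw [PySem.List.pyGetD_natCast, PySem.List.pyGetD_natCast]
        rw [List.getD_eq_getElem _ _ (by omega), List.getD_eq_getElem _ _ (by omega)]
        rw [List.getElem_take, List.getElem_drop]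
      rw [hv]
      set w := PySem.List.pyGetD row ((lo + (hi - lo) / 2 : Nat) : Int) 0 with hw
      by_cases he : w = k
      · simp [he]
      · rw [if_neg he, if_neg (fun h : k = w => he h.symm)]
        by_cases hlt2 : w < k
        · rw [if_pos hlt2, if_pos hlt2]
          have hslice : PySem.List.slice ((row.drop lo).take (hi - lo))
                (some ((((hi - lo) / 2 + 1 : Nat) : Int))) none
              = (row.drop (lo + (hi - lo) / 2 + 1)).take (hi - (lo + (hi - lo) / 2 + 1)) := by
            rw [PySem.List.slice_from_natCast, List.drop_take, List.drop_drop]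
            have e1 : hi - lo - ((hi - lo) / 2 + 1) = hi - (lo + (hi - lo) / 2 + 1) := by omega
            have e2 : lo + ((hi - lo) / 2 + 1) = lo + (hi - lo) / 2 + 1 := by omega
            rw [e1, e2]
          rw [hslice]
          have hrec := ih (hi - (lo + (hi - lo) / 2 + 1)) (by omega)
            (lo + (hi - lo) / 2 + 1) hi rfl (by omega) h2
          rw [hrec]
          cases pvBinRowA ((row.drop (lo + (hi - lo) / 2 + 1)).take (hi - (lo + (hi - lo) / 2 + 1))) k <;> simp
        · rw [if_neg hlt2, if_neg hlt2]
          have hslice : PySem.List.slice ((row.drop lo).take (hi - lo)) none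
                (some (((hi - lo) / 2 : Nat) : Int))
              = (row.drop lo).take ((lo + (hi - lo) / 2) - lo) := by
            rw [PySem.List.slice_to_natCast, List.take_take]
            congr 1; omega
          rw [hslice]
          exact ih ((hi - lo) / 2) (by omega) lo (lo + (hi - lo) / 2) (by omega) (by omega) (by omega)
    · have : hi = lo := by omega
      subst this
      rw [pvBSearch, dif_neg hlt, pvBinRowA]
      simp

theorem binary_research_eq (matrix : List (List Int)) (k : Int) :
    binary_research matrix k = binary_research_alt matrix k := by
  induction matrix with
  | nil => simp [binary_research, binary_research_alt]
  | cons row rest ih =>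
    rw [binary_research, binary_research_alt]
    by_cases h0 : row.length = 0
    · simp [h0, ih]
    · have hb := pvBSearch_eq_aux row k row.length 0 row.length rfl (Nat.zero_le _) le_rfl
      simp only [List.drop_zero, Nat.sub_zero, List.take_length] at hb
      by_cases hlo : k < PySem.List.pyGetD row 0 0 ∨ PySem.List.pyGetD row (-1) 0 < k
      · simp [h0, hlo, ih]
      · simp [h0, hlo, ih, hb]

-- ===== VERDICT (by name: the statement is the Claim_ definition above) =====
theorem binary_research_spec : Claim_equal_binary_research := by
  intro matrix k _
  unfold Spec_binary_research
  exact binary_research_eq matrix k
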